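-- pv_equiv track=rewrite | github.com/Sun-ning1/1c-7m-5put | ass1.py | get_availability
-- ===== SOURCE A (Python) =====
-- def get_availability(file):
--     product_code=[]
--     supplier_phone=[]
--     price=[]
--     availability_dict={}
--     for i in file:
--         info = i.split(",")
--         product_code.append(info[0])
--         supplier_phone.append(info[1])
--         price.append(info[2])
--
--     for i in range(len(product_code)):
--         if product_code[i] in availability_dict:
--             availability_dict[product_code[i]].append((supplier_phone[i],price[i]))
--
--         else:availability_dict[product_code[i]] = [(supplier_phone[i],price[i])]
--
--     return availability_dict
-- ===== SOURCE B (Python) =====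
-- def _parse(line):
--     info = line.split(",")
--     return (info[0], (info[1], info[2]))
--
-- def get_availability(file):
--     records = [_parse(line) for line in file]
--     keys = list(dict.fromkeys(k for k, _ in records))
--     return {k: [p for kk, p in records if kk == k] for k in keys}
-- ===== Notes on version B (the rewrite author's own statement) =====
-- stated objective: alternative
-- what changed: Instead of A's incremental dict that appends to the current group as each line arrives, B parses all lines into records, computes the distinct product codes in first-occurrence order with dict.fromkeys, and builds every group in one shot by scanning the record list per key (group-by-comprehension, O(n*k) vs A's O(n)).
import Mathlib
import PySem

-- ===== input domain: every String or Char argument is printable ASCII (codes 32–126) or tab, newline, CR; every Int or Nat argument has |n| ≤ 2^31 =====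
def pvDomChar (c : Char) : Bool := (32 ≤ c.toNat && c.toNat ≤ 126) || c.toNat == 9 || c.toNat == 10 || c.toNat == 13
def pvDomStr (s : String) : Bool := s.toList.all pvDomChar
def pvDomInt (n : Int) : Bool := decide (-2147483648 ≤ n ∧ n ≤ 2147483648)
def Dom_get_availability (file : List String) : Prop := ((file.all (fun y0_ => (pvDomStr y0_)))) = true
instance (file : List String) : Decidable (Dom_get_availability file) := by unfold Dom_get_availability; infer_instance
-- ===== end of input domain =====

-- B replaces A's incremental dict (append to the current group as each line arrives) by: parse all
-- lines into records, take the distinct codes in first-occurrence order, then build each group by a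
-- per-key scan of the records (objective: alternative decomposition, same result).

-- ===== PORT A =====
-- i.split(",") : the separator is the literal "," ≠ "", so PySem.Str.split? is always `some`; getD [] is exact
def pvSplit (s : String) : List String := (PySem.Str.split? s ",").getD []
-- info[0]/info[1]/info[2] ported as pyGetD …; exact under Pre_, where every line splits into ≥ 3 fields
def get_availability (file : List String) : List (String × List (String × String)) :=
  let lists := file.foldl
    (fun (st : List String × List String × List String) i =>
      let info := pvSplit i
      (st.1 ++ [PySem.List.pyGetD info 0 ""],
       st.2.1 ++ [PySem.List.pyGetD info 1 ""],
       st.2.2 ++ [PySem.List.pyGetD info 2 ""]))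
    ([], [], [])
  let product_code := lists.1
  let supplier_phone := lists.2.1
  let price := lists.2.2
  let d := (PySem.List.pyRange 0 (PySem.List.len product_code) 1).foldl
    (fun (d : PySem.Dict String (List (String × String))) i =>
      if d.contains (PySem.List.pyGetD product_code i "") then
        d.modify (PySem.List.pyGetD product_code i "") []
          (· ++ [(PySem.List.pyGetD supplier_phone i "", PySem.List.pyGetD price i "")])
      else
        d.insert (PySem.List.pyGetD product_code i "")
          [(PySem.List.pyGetD supplier_phone i "", PySem.List.pyGetD price i "")])
    PySem.Dict.empty
  d.items

-- ===== PORT B =====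
-- _parse(line): split once, keep (code, (phone, price))
def pvParse (s : String) : String × (String × String) :=
  let info := pvSplit s
  (PySem.List.pyGetD info 0 "", (PySem.List.pyGetD info 1 "", PySem.List.pyGetD info 2 ""))
-- list(dict.fromkeys(...)) = PySem.List.dedup; the final dict comprehension inserts each
-- distinct key once in order (ported as the insert fold over keys, then .items)
def get_availability_alt (file : List String) : List (String × List (String × String)) :=
  let records := file.map pvParse
  let keys := PySem.List.dedup (records.map (·.1))
  (keys.foldl
    (fun (d : PySem.Dict String (List (String × String))) k =>
      d.insert k ((records.filter (fun r => r.1 == k)).map (·.2)))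
    PySem.Dict.empty).items

-- ===== PRECONDITION & SPEC =====
-- Pre_ excludes exactly the inputs where A raises IndexError: a line with fewer than two commas
-- makes info[1] or info[2] out of range.
def Pre_get_availability (file : List String) : Prop :=
  ∀ s ∈ file, 3 ≤ (pvSplit s).length
instance (file : List String) : Decidable (Pre_get_availability file) := by
  unfold Pre_get_availability; infer_instance
def pvWitness_get_availability : List String := ["a,1,2", "b,3,4", "a,5,6"]

def Spec_get_availability (file : List String) (out : List (String × List (String × String))) : Prop := out = get_availability_alt file
instance (file : List String) (out : List (String × List (String × String))) : Decidable (Spec_get_availability file out) := by unfold Spec_get_availability; infer_instance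

-- ===== CLAIM (what is proved, stated in full; the proofs are below) =====
def Claim_equal_get_availability : Prop := ∀ (file : List String), Dom_get_availability file → Pre_get_availability file → Spec_get_availability file (get_availability file)

-- ===== LEMMAS AND PROOFS =====

def pvF0 (s : String) : String := PySem.List.pyGetD (pvSplit s) 0 ""
def pvF1 (s : String) : String := PySem.List.pyGetD (pvSplit s) 1 ""
def pvF2 (s : String) : String := PySem.List.pyGetD (pvSplit s) 2 ""

-- A's first loop builds the three map lists
theorem pv_first_loop (l : List String) (a b c : List String) :
    l.foldl
      (fun (st : List String × List String × List String) i =>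
        let info := pvSplit i
        (st.1 ++ [PySem.List.pyGetD info 0 ""],
         st.2.1 ++ [PySem.List.pyGetD info 1 ""],
         st.2.2 ++ [PySem.List.pyGetD info 2 ""]))
      (a, b, c)
    = (a ++ l.map pvF0, b ++ l.map pvF1, c ++ l.map pvF2) := by
  induction l generalizing a b c with
  | nil => simp
  | cons x t ih =>
    simp only [List.foldl_cons, List.map_cons, ih]
    simp [pvF0, pvF1, pvF2]

-- an index fold over three parallel map lists is a direct fold over the source list
theorem pv_range_fold {δ : Type} (F : δ → String → String → String → δ)
    (l : List String) (d : δ) :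
    (PySem.List.pyRange 0 (PySem.List.len (l.map pvF0)) 1).foldl
      (fun acc i =>
        F acc (PySem.List.pyGetD (l.map pvF0) i "")
              (PySem.List.pyGetD (l.map pvF1) i "")
              (PySem.List.pyGetD (l.map pvF2) i ""))
      d
    = l.foldl (fun acc s => F acc (pvF0 s) (pvF1 s) (pvF2 s)) d := by
  induction l generalizing d with
  | nil => simp
  | cons x t ih =>
    have hcons : PySem.List.pyRange 0 (PySem.List.len ((x :: t).map pvF0)) 1
        = 0 :: PySem.List.pyRange 1 (PySem.List.len ((x :: t).map pvF0)) 1 := by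
      apply PySem.List.pyRange_one_cons
      simp [PySem.List.len]
    rw [hcons]
    simp only [List.foldl_cons]
    have hshift : PySem.List.pyRange 1 (PySem.List.len ((x :: t).map pvF0)) 1
        = (PySem.List.pyRange 0 (PySem.List.len (t.map pvF0)) 1).map (fun j => j + 1) := by
      simp only [PySem.List.pyRange_one, PySem.List.len]
      simp only [List.length_map, List.length_cons]
      have hn : (((t.length + 1 : ℕ) : Int) - 1).toNat = (((t.length : ℕ) : Int) - 0).toNat := by
        push_cast; omega
      rw [hn, List.map_map]
      apply List.map_congr_left
      intro k _
      simp
      omega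
    rw [hshift, List.foldl_map]
    have hstep : ∀ (acc : δ) (j : Int), j ∈ PySem.List.pyRange 0 (PySem.List.len (t.map pvF0)) 1 →
        F acc (PySem.List.pyGetD ((x :: t).map pvF0) (j + 1) "")
              (PySem.List.pyGetD ((x :: t).map pvF1) (j + 1) "")
              (PySem.List.pyGetD ((x :: t).map pvF2) (j + 1) "")
        = F acc (PySem.List.pyGetD (t.map pvF0) j "")
                (PySem.List.pyGetD (t.map pvF1) j "")
                (PySem.List.pyGetD (t.map pvF2) j "") := by
      intro acc j hj
      rw [PySem.List.mem_pyRange_one] at hj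
      obtain ⟨h0, _⟩ := hj
      obtain ⟨k, rfl⟩ : ∃ k : ℕ, j = (k : Int) := ⟨j.toNat, by omega⟩
      have : (k : Int) + 1 = ((k + 1 : ℕ) : Int) := by push_cast; ring
      rw [this]
      simp only [PySem.List.pyGetD_natCast, List.getD, List.getElem?_map, List.getElem?_cons_succ]
    have h0 : ∀ (g : String → String),
        PySem.List.pyGetD ((x :: t).map g) (0 : Int) "" = g x := by
      intro g; simp [List.map_cons]
    rw [h0 pvF0, h0 pvF1, h0 pvF2]
    rw [PySem.List.foldl_congr_mem _ _ _ _ (fun acc j hj => hstep acc j hj)]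
    exact ih (F d (pvF0 x) (pvF1 x) (pvF2 x))

-- A's dict step equals the unconditional modify-append step
theorem pv_step_eq (d : PySem.Dict String (List (String × String))) (k p1 p2 : String) :
    (if d.contains k then d.modify k [] (· ++ [(p1, p2)])
     else d.insert k [(p1, p2)])
    = d.modify k [] (· ++ [(p1, p2)]) := by
  by_cases h : d.contains k
  · simp [h]
  · simp only [h, Bool.false_eq_true, if_false]
    unfold PySem.Dict.modify
    rw [PySem.Dict.getD_of_not_contains d [] (by simpa using h)]
    simp

-- the modify-append fold over records equals B's per-key grouping
theorem pv_group (records : List (String × (String × String))) :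
    (records.foldl
      (fun (d : PySem.Dict String (List (String × String))) (p : String × (String × String)) =>
        d.modify p.1 [] (· ++ [p.2]))
      PySem.Dict.empty).items
    = ((PySem.List.dedup (records.map (fun (r : String × (String × String)) => r.1))).foldl
        (fun (d : PySem.Dict String (List (String × String))) (k : String) =>
          d.insert k ((records.filter (fun (r : String × (String × String)) => r.1 == k)).map
            (fun (r : String × (String × String)) => r.2)))
        PySem.Dict.empty).items := by
  set dA := records.foldl
      (fun (d : PySem.Dict String (List (String × String))) (p : String × (String × String)) =>
        d.modify p.1 [] (· ++ [p.2])) PySem.Dict.empty with hdA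
  have hkeys : dA.keys = PySem.List.dedup (records.map (fun (r : String × (String × String)) => r.1)) := by
    rw [hdA, PySem.Dict.keys_foldl_modify_key]
    simp [PySem.Set.update_nil_left, PySem.Dict.keys_empty]
  have hnd : dA.keys.Nodup := by
    rw [hkeys]; exact PySem.List.nodup_dedup _
  have hget : ∀ k, dA.getD k [] = (records.filter (fun (r : String × (String × String)) => r.1 == k)).map
      (fun (r : String × (String × String)) => r.2) := by
    intro k
    rw [hdA, PySem.Dict.getD_foldl_modify_append, PySem.Dict.getD_empty]
    simp
  rw [PySem.Dict.items_eq_map_keys dA hnd [], hkeys]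
  refine Eq.trans ?_ (Eq.symm (PySem.Dict.items_foldl_insert_fresh
    (PySem.List.dedup (records.map (fun (r : String × (String × String)) => r.1)))
    (fun (a : String) => a)
    (fun (a : String) => (records.filter (fun (r : String × (String × String)) => r.1 == a)).map
      (fun (r : String × (String × String)) => r.2))
    PySem.Dict.empty
    (by intro a _; exact PySem.Dict.contains_empty a)
    (by simp)))
  simp only [PySem.Dict.empty, List.nil_append]
  apply List.map_congr_left
  intro k _
  rw [hget]

-- ===== VERDICT (by name: the statement is the Claim_ definition above) =====
theorem get_availability_spec : Claim_equal_get_availability := by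
  intro file _ _
  unfold Spec_get_availability get_availability get_availability_alt
  simp only [pv_first_loop]
  simp only [List.nil_append]
  rw [pv_range_fold
    (fun (d : PySem.Dict String (List (String × String))) k p1 p2 =>
      if d.contains k then d.modify k [] (· ++ [(p1, p2)]) else d.insert k [(p1, p2)])]
  have hA : file.foldl
      (fun (d : PySem.Dict String (List (String × String))) s =>
        if d.contains (pvF0 s) then d.modify (pvF0 s) [] (· ++ [(pvF1 s, pvF2 s)])
        else d.insert (pvF0 s) [(pvF1 s, pvF2 s)])
      PySem.Dict.empty
      = (file.map pvParse).foldl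
        (fun (d : PySem.Dict String (List (String × String))) (p : String × (String × String)) =>
          d.modify p.1 [] (· ++ [p.2]))
        PySem.Dict.empty := by
    rw [List.foldl_map]
    apply PySem.List.foldl_congr_mem
    intro acc s _
    simp only [pv_step_eq]
    rfl
  rw [hA, pv_group]
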